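-- pv_equiv track=rewrite | github.com/OksanaMelashchenko/mon_cours | dz6(1).py | copi_elem
-- ===== SOURCE A (Python) =====
-- def copi_elem(a_list, d):
--     result = []
--     i = 0
--     l = len(a_list)
--     if d == 0:
--         return result
--     for el in range(d):
--         j = el % l
--         result.append(a_list[j])
--     return result
-- ===== SOURCE B (Python) =====
-- def copi_elem(a_list, d):
--     if d <= 0:
--         return []
--     q, r = divmod(d, len(a_list))
--     return a_list * q + a_list[:r]
-- ===== Notes on version B (the rewrite author's own statement) =====
-- stated objective: faster
-- what changed: Replaces the per-element loop that appends a_list[el % l] for each el in range(d) with bulk list replication: divmod(d, len(a_list)) gives how many whole copies plus a prefix slice, built with list * and slicing.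
import Mathlib
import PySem

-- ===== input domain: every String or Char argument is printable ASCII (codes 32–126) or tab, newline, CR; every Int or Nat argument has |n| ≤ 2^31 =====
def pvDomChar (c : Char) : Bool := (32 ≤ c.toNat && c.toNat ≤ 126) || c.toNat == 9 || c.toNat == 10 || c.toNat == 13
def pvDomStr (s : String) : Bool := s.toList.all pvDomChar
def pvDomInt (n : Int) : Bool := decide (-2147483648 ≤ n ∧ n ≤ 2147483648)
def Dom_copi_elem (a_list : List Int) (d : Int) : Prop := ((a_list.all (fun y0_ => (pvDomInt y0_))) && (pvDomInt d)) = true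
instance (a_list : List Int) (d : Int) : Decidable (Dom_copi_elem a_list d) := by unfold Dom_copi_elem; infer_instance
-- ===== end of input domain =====

-- B builds the cyclic list by whole-list replication plus a prefix slice (divmod) instead of appending one modular-indexed element per loop step.


-- ===== PORT A =====
def copi_elem (a_list : List Int) (d : Int) : List Int :=
  let result : List Int := []
  let l : Int := a_list.length
  if d = 0 then result
  else
    (PySem.List.pyRange 0 d 1).foldl
      (fun result el =>
        let j := PySem.Int.mod el l
        result ++ [PySem.List.pyGetD a_list j 0]) result

-- ===== PORT B =====
def copi_elem_alt (a_list : List Int) (d : Int) : List Int :=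
  if d ≤ 0 then []
  else
    let q := PySem.Int.floordiv d a_list.length
    let r := PySem.Int.mod d a_list.length
    PySem.List.pyRepeat a_list q ++ PySem.List.slice a_list none (some r)

-- ===== PRECONDITION & SPEC =====
-- Pre_ excludes exactly the inputs where A raises ZeroDivisionError (el % 0): empty a_list with d > 0.
def Pre_copi_elem (a_list : List Int) (d : Int) : Prop := a_list ≠ [] ∨ d ≤ 0
instance (a_list : List Int) (d : Int) : Decidable (Pre_copi_elem a_list d) := by unfold Pre_copi_elem; infer_instance
def pvWitness_copi_elem : List Int × Int := ([1, 2, 3], 7)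

def Spec_copi_elem (a_list : List Int) (d : Int) (out : List Int) : Prop := out = copi_elem_alt a_list d
instance (a_list : List Int) (d : Int) (out : List Int) : Decidable (Spec_copi_elem a_list d out) := by unfold Spec_copi_elem; infer_instance

-- ===== CLAIM (what is proved, stated in full; the proofs are below) =====
def Claim_equal_copi_elem : Prop := ∀ (a_list : List Int) (d : Int), Dom_copi_elem a_list d → Pre_copi_elem a_list d → Spec_copi_elem a_list d (copi_elem a_list d)

-- ===== LEMMAS AND PROOFS =====

-- Characterisation of the cyclic map on the Nat side: n steps of modular indexing
-- equal (n / l) whole copies of xs followed by its first (n % l) elements.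
lemma cyc_map_eq (xs : List Int) (hx : xs ≠ []) (n : Nat) :
    (List.range n).map (fun k => xs.getD (k % xs.length) 0)
      = (List.replicate (n / xs.length) xs).flatten ++ xs.take (n % xs.length) := by
  have hl : 0 < xs.length := List.length_pos_iff.mpr hx
  induction n with
  | zero => simp
  | succ n ih =>
    rw [List.range_succ, List.map_append, ih]
    have hr : n % xs.length < xs.length := Nat.mod_lt _ hl
    have hget : xs.getD (n % xs.length) 0 = xs[n % xs.length] := List.getD_eq_getElem xs 0 hr
    have h := Nat.div_add_mod n xs.length
    rw [Nat.mul_comm] at h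
    by_cases hc : n % xs.length + 1 < xs.length
    · have hmod : (n + 1) % xs.length = n % xs.length + 1 := by
        conv_lhs => rw [show n + 1 = (n % xs.length + 1) + (n / xs.length) * xs.length from by omega]
        rw [Nat.add_mul_mod_self_right, Nat.mod_eq_of_lt hc]
      have hdiv : (n + 1) / xs.length = n / xs.length := by
        conv_lhs => rw [show n + 1 = (n % xs.length + 1) + (n / xs.length) * xs.length from by omega]
        rw [Nat.add_mul_div_right _ _ hl, Nat.div_eq_of_lt hc, Nat.zero_add]
      rw [hmod, hdiv, List.append_assoc]
      congr 1
      simp only [List.map_singleton]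
      rw [hget]
      exact List.take_append_getElem hr
    · have hc' : n % xs.length + 1 = xs.length := by omega
      have heq : n + 1 = (n / xs.length + 1) * xs.length := by
        rw [Nat.add_mul, Nat.one_mul]; omega
      have hmod : (n + 1) % xs.length = 0 := by rw [heq]; exact Nat.mul_mod_left _ _
      have hdiv : (n + 1) / xs.length = n / xs.length + 1 := by rw [heq]; exact Nat.mul_div_cancel _ hl
      simp only [List.map_singleton]
      rw [hmod, hdiv, List.replicate_succ', List.flatten_append, List.append_assoc,
        hget, List.take_append_getElem hr, hc', List.take_length]
      simp

-- A's loop result, simplified to the replicated form, for positive d.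
lemma copi_elem_pos (a_list : List Int) (d : Int) (hx : a_list ≠ []) (hd : 0 < d) :
    copi_elem a_list d
      = (List.replicate (d.toNat / a_list.length) a_list).flatten
          ++ a_list.take (d.toNat % a_list.length) := by
  have hd0 : d ≠ 0 := by omega
  unfold copi_elem
  simp only [if_neg hd0]
  rw [PySem.List.foldl_append_singleton_eq_map, List.nil_append]
  rw [PySem.List.pyRange_one, List.map_map]
  have hdt : (d - 0).toNat = d.toNat := by omega
  rw [hdt]
  rw [← cyc_map_eq a_list hx d.toNat]
  apply List.map_congr_left
  intro k _
  simp only [Function.comp, zero_add]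
  rw [PySem.Int.mod_natCast, PySem.List.pyGetD_natCast]

-- ===== VERDICT (by name: the statement is the Claim_ definition above) =====
theorem copi_elem_spec : Claim_equal_copi_elem := by
  intro a_list d _ hpre
  unfold Spec_copi_elem
  by_cases hd : d ≤ 0
  · unfold copi_elem copi_elem_alt
    rw [if_pos hd]
    by_cases h0 : d = 0
    · simp [h0]
    · rw [if_neg h0, PySem.List.pyRange_one_eq_nil hd, List.foldl_nil]
  · have hdp : 0 < d := by omega
    have hx : a_list ≠ [] := by
      rcases hpre with h | h
      · exact h
      · omega
    rw [copi_elem_pos a_list d hx hdp]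
    unfold copi_elem_alt
    rw [if_neg hd]
    have h1 : PySem.Int.floordiv d a_list.length = ((d.toNat / a_list.length : Nat) : Int) := by
      conv_lhs => rw [show d = ((d.toNat : Nat) : Int) from by omega]
      exact PySem.Int.floordiv_natCast _ _
    have h2 : PySem.Int.mod d (a_list.length : Int) = ((d.toNat % a_list.length : Nat) : Int) := by
      conv_lhs => rw [show d = ((d.toNat : Nat) : Int) from by omega]
      exact PySem.Int.mod_natCast _ _
    simp only []
    rw [h1, h2, PySem.List.slice_to_natCast]
    simp only [PySem.List.pyRepeat, Int.toNat_natCast]
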